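-- pv_equiv track=rewrite | github.com/ed-kiryukhin/MITx_6.00.1x | ProblemSet01/PS01-3.py | item_order
-- ===== SOURCE A (Python) =====
-- def item_order (order):
-- 	salad_count=0
-- 	hamburger_count=0
-- 	water_count=0
-- 	order_list=order.split()
-- 	for item in order_list:
-- 		if item=="salad":
-- 			salad_count+=1
-- 		if item=="hamburger":
-- 			hamburger_count+=1
-- 		if item=="water":
-- 			water_count+=1
-- 	return "salad:%d hamburger:%d water:%d" % (salad_count, hamburger_count, water_count)
-- ===== SOURCE B (Python) =====
-- def item_order(order):
--     salad = 0
--     hamburger = 0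
--     water = 0
--     token = ""
--     for ch in order + " ":
--         if ch.isspace():
--             if token == "salad":
--                 salad += 1
--             elif token == "hamburger":
--                 hamburger += 1
--             elif token == "water":
--                 water += 1
--             token = ""
--         else:
--             token += ch
--     return "salad:%d hamburger:%d water:%d" % (salad, hamburger, water)
-- ===== Notes on version B (the rewrite author's own statement) =====
-- stated objective: alternative
-- what changed: Replaced split()-then-word-loop by a single character-level state machine: B scans the raw string once, accumulating the current token and flushing it into the matching counter at each whitespace boundary, never building the word list.
import Mathlib
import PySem

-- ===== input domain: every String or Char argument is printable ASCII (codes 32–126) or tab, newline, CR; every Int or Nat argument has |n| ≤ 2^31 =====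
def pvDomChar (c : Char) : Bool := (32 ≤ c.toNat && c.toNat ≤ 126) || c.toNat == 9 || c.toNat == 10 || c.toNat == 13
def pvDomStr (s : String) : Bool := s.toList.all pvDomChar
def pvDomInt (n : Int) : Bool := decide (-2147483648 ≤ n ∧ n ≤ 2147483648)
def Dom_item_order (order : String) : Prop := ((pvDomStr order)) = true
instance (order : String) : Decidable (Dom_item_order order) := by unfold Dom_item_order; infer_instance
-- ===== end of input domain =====

-- B replaces A's split()-then-word-loop by a single character-level state machine that
-- accumulates the current token and flushes it into the matching counter at each
-- whitespace boundary, never building the word list (alternative; same cost).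


-- ===== PORT A =====
-- the loop body: three independent ifs updating the three counters
def itemOrderStep (s : Int × Int × Int) (item : String) : Int × Int × Int :=
  let s := if item == "salad" then (s.1 + 1, s.2.1, s.2.2) else s
  let s := if item == "hamburger" then (s.1, s.2.1 + 1, s.2.2) else s
  if item == "water" then (s.1, s.2.1, s.2.2 + 1) else s

-- the loop 'for item in order_list' with three counters
def item_order (order : String) : String :=
  let order_list := PySem.Str.split₀ order
  let st : Int × Int × Int := order_list.foldl itemOrderStep (0, 0, 0)
  "salad:" ++ PySem.Int.toStr st.1 ++ " hamburger:" ++ PySem.Int.toStr st.2.1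
    ++ " water:" ++ PySem.Int.toStr st.2.2

-- ===== PORT B =====
-- flush the finished token into the matching counter (B's if/elif chain at a boundary)
def itemOrderFlush (v : Int × Int × Int) (tok : List Char) : Int × Int × Int :=
  if tok = "salad".toList then (v.1 + 1, v.2.1, v.2.2)
  else if tok = "hamburger".toList then (v.1, v.2.1 + 1, v.2.2)
  else if tok = "water".toList then (v.1, v.2.1, v.2.2 + 1)
  else v

-- one character of B's scan: whitespace flushes the token, anything else extends it
def itemOrderAltStep (st : (Int × Int × Int) × List Char) (c : Char) : (Int × Int × Int) × List Char :=
  if PySem.Chars.isspace c then (itemOrderFlush st.1 st.2, []) else (st.1, st.2 ++ [c])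

-- the loop 'for ch in order + " "' carrying the counters and the current token
def item_order_alt (order : String) : String :=
  let st := (order.toList ++ [' ']).foldl itemOrderAltStep ((0, 0, 0), [])
  "salad:" ++ PySem.Int.toStr st.1.1 ++ " hamburger:" ++ PySem.Int.toStr st.1.2.1
    ++ " water:" ++ PySem.Int.toStr st.1.2.2

-- ===== PRECONDITION & SPEC =====
def Spec_item_order (order : String) (out : String) : Prop := out = item_order_alt order
instance (order : String) (out : String) : Decidable (Spec_item_order order out) := by unfold Spec_item_order; infer_instance

-- ===== CLAIM (what is proved, stated in full; the proofs are below) =====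
def Claim_equal_item_order : Prop := ∀ (order : String), Dom_item_order order → Spec_item_order order (item_order order)

-- ===== LEMMAS AND PROOFS =====
-- the two definitional equations of split₀'s worker
theorem split0_go_nil (cur : List Char) (acc : List (List Char)) :
    PySem.Chars.split₀.go [] cur acc
      = if cur.isEmpty then acc.reverse else (cur.reverse :: acc).reverse := rfl

theorem split0_go_cons (c : Char) (rest cur : List Char) (acc : List (List Char)) :
    PySem.Chars.split₀.go (c :: rest) cur acc
      = if PySem.Chars.isspace c then
          (if cur.isEmpty then PySem.Chars.split₀.go rest [] acc
           else PySem.Chars.split₀.go rest [] (cur.reverse :: acc))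
        else PySem.Chars.split₀.go rest (c :: cur) acc := rfl

-- split₀.go's accumulator is just the reversed output emitted so far
theorem split0_go_acc (cs : List Char) : ∀ (cur : List Char) (acc : List (List Char)),
    PySem.Chars.split₀.go cs cur acc = acc.reverse ++ PySem.Chars.split₀.go cs cur [] := by
  induction cs with
  | nil =>
    intro cur acc
    rw [split0_go_nil, split0_go_nil]
    by_cases h : cur.isEmpty <;> simp [h]
  | cons c rest ih =>
    intro cur acc
    rw [split0_go_cons, split0_go_cons]
    by_cases hsp : PySem.Chars.isspace c
    · by_cases hcur : cur.isEmpty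
      · simp only [hsp, hcur, if_true]
        exact ih [] acc
      · simp only [hsp, hcur, if_true, if_false, Bool.false_eq_true]
        rw [ih [] (cur.reverse :: acc), ih [] [cur.reverse]]
        simp
    · simp only [hsp, Bool.false_eq_true, if_false]
      exact ih (c :: cur) acc

-- B's character scan computes A's fold over the words that split₀ will produce
theorem alt_scan_eq (cs : List Char) : ∀ (tok : List Char) (v : Int × Int × Int),
    ((cs ++ [' ']).foldl itemOrderAltStep (v, tok)).1
      = (PySem.Chars.split₀.go cs tok.reverse []).foldl itemOrderFlush v := by
  have hspace : PySem.Chars.isspace ' ' = true := by decide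
  induction cs with
  | nil =>
    intro tok v
    rw [List.nil_append, List.foldl_cons, List.foldl_nil, split0_go_nil,
      show itemOrderAltStep (v, tok) ' ' = (itemOrderFlush v tok, []) by
        simp [itemOrderAltStep, hspace]]
    by_cases h : tok = []
    · subst h
      simp [itemOrderFlush]
    · have hrev : tok.reverse.isEmpty = false := by simp [h]
      simp [hrev]
  | cons c rest ih =>
    intro tok v
    rw [List.cons_append, List.foldl_cons, split0_go_cons]
    by_cases hsp : PySem.Chars.isspace c
    · rw [show itemOrderAltStep (v, tok) c = (itemOrderFlush v tok, []) by
          simp [itemOrderAltStep, hsp],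
        ih [] (itemOrderFlush v tok)]
      by_cases h : tok = []
      · subst h
        simp [hsp, itemOrderFlush]
      · have hrev : tok.reverse.isEmpty = false := by simp [h]
        simp only [hsp, hrev, if_true, Bool.false_eq_true, if_false,
          List.reverse_reverse]
        rw [split0_go_acc rest [] [tok]]
        simp
    · rw [show itemOrderAltStep (v, tok) c = (v, tok ++ [c]) by
          simp [itemOrderAltStep, hsp],
        ih (tok ++ [c]) v]
      simp [hsp]
  -- note: List.reverse_nil keeps the `go rest [] []` shapes aligned via simp above

-- A's step on the packed word equals B's flush on the raw characters
theorem step_eq_flush (a : Int × Int × Int) (w : List Char) :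
    itemOrderStep a (String.ofList w) = itemOrderFlush a w := by
  simp only [itemOrderStep, itemOrderFlush, beq_iff_eq, String.ofList_eq]
  by_cases h1 : w = "salad".toList <;> by_cases h2 : w = "hamburger".toList <;>
    by_cases h3 : w = "water".toList <;> simp_all

-- ===== VERDICT (by name: the statement is the Claim_ definition above) =====
theorem item_order_spec : Claim_equal_item_order := by
  intro order _
  show item_order order = item_order_alt order
  have hB := alt_scan_eq order.toList [] (0, 0, 0)
  rw [List.reverse_nil,
    show PySem.Chars.split₀.go order.toList [] [] = PySem.Chars.split₀ order.toList
      from rfl] at hB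
  simp only [item_order, item_order_alt, PySem.Str.split₀, List.foldl_map,
    step_eq_flush, hB]
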